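-- pv_equiv track=rewrite | github.com/antoniocarluccireply/horizon-call-extractor | aws_lambda/parser_horizon.py | _trim_title_stop_phrases
-- ===== SOURCE A (Python) =====
-- STOP_TITLE_MARKERS = (
--     "annex",
--     "eligibility conditions",
--     "admissibility conditions",
--     "general conditions",
--     "conditions are described in general",
--     "topic conditions and documents",
--     "opening date",
--     "deadline date",
--     "deadline(s)",
--     "expected outcome",
--     "scope",
--     "funding opportunities",
--     "call:",
--     "indicative budget",
--     "type of action",
--     "technology readiness level",
--     "legal and financial set-up",
--     "security sensitive topics",
-- )
--
-- def _trim_title_stop_phrases(title: str) -> str: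
--     low = (title or "").lower()
--     cut = len(title or "")
--     for marker in STOP_TITLE_MARKERS:
--         idx = low.find(marker)
--         if idx != -1:
--             cut = min(cut, idx)
--     return title[:cut].strip(" -;,.") if title else title
-- ===== SOURCE B (Python) =====
-- STOP_TITLE_MARKERS = (
--     "annex",
--     "eligibility conditions",
--     "admissibility conditions",
--     "general conditions",
--     "conditions are described in general",
--     "topic conditions and documents",
--     "opening date",
--     "deadline date",
--     "deadline(s)",
--     "expected outcome",
--     "scope",
--     "funding opportunities",
--     "call:",
--     "indicative budget",
--     "type of action",
--     "technology readiness level",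
--     "legal and financial set-up",
--     "security sensitive topics",
-- )
--
--
-- def _trim_title_stop_phrases(title: str) -> str:
--     # Single left-to-right scan: cut at the first position where any marker
--     # starts (instead of one .find() pass per marker followed by a min).
--     if not title:
--         return title
--     low = title.lower()
--     cut = len(title)
--     for i in range(len(low)):
--         if any(low.startswith(m, i) for m in STOP_TITLE_MARKERS):
--             cut = i
--             break
--     return title[:cut].strip(" -;,.")
-- ===== Notes on version B (the rewrite author's own statement) =====
-- stated objective: alternative
-- what changed: Replaces the per-marker full-string .find() scans combined with a running min by a single left-to-right scan over positions that stops at the first index where any marker starts.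
import Mathlib
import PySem

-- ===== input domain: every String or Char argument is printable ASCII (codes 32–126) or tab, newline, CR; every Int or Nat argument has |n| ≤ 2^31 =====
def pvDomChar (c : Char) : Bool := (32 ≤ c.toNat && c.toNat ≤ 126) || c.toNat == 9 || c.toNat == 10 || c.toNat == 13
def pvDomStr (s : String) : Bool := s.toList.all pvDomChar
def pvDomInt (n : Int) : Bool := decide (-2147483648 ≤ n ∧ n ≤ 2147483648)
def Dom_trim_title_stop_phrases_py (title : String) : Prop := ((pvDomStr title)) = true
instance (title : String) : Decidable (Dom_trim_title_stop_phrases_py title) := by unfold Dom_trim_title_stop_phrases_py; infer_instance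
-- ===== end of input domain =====

-- B replaces A's 18 per-marker .find() scans + running min by one left-to-right scan
-- stopping at the first position where any marker starts (alternative algorithm, same cost class).

-- the module-level tuple STOP_TITLE_MARKERS, shared by both ports
def pvStopMarkers : List String :=
  ["annex", "eligibility conditions", "admissibility conditions", "general conditions",
   "conditions are described in general", "topic conditions and documents", "opening date",
   "deadline date", "deadline(s)", "expected outcome", "scope", "funding opportunities",
   "call:", "indicative budget", "type of action", "technology readiness level",
   "legal and financial set-up", "security sensitive topics"]

-- ===== PORT A =====
def trim_title_stop_phrases_py (title : String) : String :=
  -- low = (title or "").lower(); for a str, `title or ""` is "" iff title is empty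
  let low := PySem.Str.lower (if title = "" then "" else title)
  -- cut = len(title or "")
  let cut : Int := PySem.Str.len (if title = "" then "" else title)
  -- for marker in STOP_TITLE_MARKERS: idx = low.find(marker); if idx != -1: cut = min(cut, idx)
  let cut : Int := pvStopMarkers.foldl (fun cut marker =>
      let idx := PySem.Str.find low marker
      if idx ≠ -1 then min cut idx else cut) cut
  -- return title[:cut].strip(" -;,.") if title else title
  if title = "" then title
  else PySem.Str.stripChars (PySem.Str.slice title none (some cut)) " -;,."

-- ===== PORT B =====
-- the `for i in range(len(low)): if any(low.startswith(m, i) …): cut = i; break` loop of Source B: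
-- scans the suffixes of `low` left to right carrying the index i;
-- low.startswith(m, i) (0 ≤ i ≤ len) is exactly `m.toList.isPrefixOf (suffix at i)`
def pvFirstStop : List Char → Nat → Nat
  | [], i => i
  | c :: rest, i =>
    if pvStopMarkers.any (fun m => m.toList.isPrefixOf (c :: rest)) then i
    else pvFirstStop rest (i + 1)

def trim_title_stop_phrases_py_alt (title : String) : String :=
  if title = "" then title
  else
    let low := PySem.Str.lower title
    let cut := pvFirstStop low.toList 0
    PySem.Str.stripChars (PySem.Str.slice title none (some (cut : Int))) " -;,."

-- ===== PRECONDITION & SPEC =====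
def Spec_trim_title_stop_phrases_py (title : String) (out : String) : Prop := out = trim_title_stop_phrases_py_alt title
instance (title : String) (out : String) : Decidable (Spec_trim_title_stop_phrases_py title out) := by unfold Spec_trim_title_stop_phrases_py; infer_instance

-- ===== CLAIM (what is proved, stated in full; the proofs are below) =====
def Claim_equal_trim_title_stop_phrases_py : Prop := ∀ (title : String), Dom_trim_title_stop_phrases_py title → Spec_trim_title_stop_phrases_py title (trim_title_stop_phrases_py title)

-- ===== LEMMAS AND PROOFS =====

lemma pvFirstStop_shift (s : List Char) (i : Nat) :
    pvFirstStop s i = i + pvFirstStop s 0 := by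
  induction s generalizing i with
  | nil => simp [pvFirstStop]
  | cons c rest ih =>
    by_cases h : pvStopMarkers.any (fun m => m.toList.isPrefixOf (c :: rest)) = true
    · simp [pvFirstStop, h]
    · simp only [pvFirstStop, if_neg h]
      rw [ih (i + 1), ih 1]
      omega

lemma pvFirstStop_le (s : List Char) : pvFirstStop s 0 ≤ s.length := by
  induction s with
  | nil => simp [pvFirstStop]
  | cons c rest ih =>
    by_cases h : pvStopMarkers.any (fun m => m.toList.isPrefixOf (c :: rest)) = true
    · simp [pvFirstStop, h]
    · simp only [pvFirstStop, if_neg h]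
      rw [pvFirstStop_shift]
      simp only [List.length_cons]
      omega

lemma pvFirstStop_hit (s : List Char) (h : pvFirstStop s 0 < s.length) :
    pvStopMarkers.any (fun m => m.toList.isPrefixOf (s.drop (pvFirstStop s 0))) = true := by
  induction s with
  | nil => simp at h
  | cons c rest ih =>
    by_cases hc : pvStopMarkers.any (fun m => m.toList.isPrefixOf (c :: rest)) = true
    · simp [pvFirstStop, hc]
    · simp only [pvFirstStop, if_neg hc] at h ⊢
      rw [pvFirstStop_shift] at h ⊢
      simp only [List.length_cons] at h
      have h' : pvFirstStop rest 0 < rest.length := by omega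
      have hadd : 1 + pvFirstStop rest 0 = pvFirstStop rest 0 + 1 := by omega
      rw [hadd, List.drop_succ_cons]
      exact ih h'

lemma pvFirstStop_min (s : List Char) (j : Nat) (h : j < pvFirstStop s 0) :
    pvStopMarkers.any (fun m => m.toList.isPrefixOf (s.drop j)) = false := by
  induction s generalizing j with
  | nil => simp [pvFirstStop] at h
  | cons c rest ih =>
    by_cases hc : pvStopMarkers.any (fun m => m.toList.isPrefixOf (c :: rest)) = true
    · simp [pvFirstStop, hc] at h
    · simp only [pvFirstStop, if_neg hc] at h
      rw [pvFirstStop_shift] at h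
      cases j with
      | zero => simpa using hc
      | succ k =>
        simp only [List.drop_succ_cons]
        exact ih k (by omega)

lemma pvFoldl_min_spec (low : String) (markers : List String) (c0 : Int) :
    (markers.foldl (fun cut marker =>
        let idx := PySem.Str.find low marker
        if idx ≠ -1 then min cut idx else cut) c0) ≤ c0
    ∧ (∀ m ∈ markers, PySem.Str.find low m ≠ -1 →
        (markers.foldl (fun cut marker =>
          let idx := PySem.Str.find low marker
          if idx ≠ -1 then min cut idx else cut) c0) ≤ PySem.Str.find low m)
    ∧ ((markers.foldl (fun cut marker =>
          let idx := PySem.Str.find low marker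
          if idx ≠ -1 then min cut idx else cut) c0) = c0
       ∨ ∃ m ∈ markers, PySem.Str.find low m ≠ -1 ∧
          (markers.foldl (fun cut marker =>
            let idx := PySem.Str.find low marker
            if idx ≠ -1 then min cut idx else cut) c0) = PySem.Str.find low m) := by
  induction markers generalizing c0 with
  | nil => simp
  | cons m ms ih =>
    simp only [List.foldl_cons]
    obtain ⟨h1, h2, h3⟩ := ih (if PySem.Str.find low m ≠ -1 then min c0 (PySem.Str.find low m) else c0)
    have hc1 : (if PySem.Str.find low m ≠ -1 then min c0 (PySem.Str.find low m) else c0) ≤ c0 := by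
      split_ifs <;> simp
    refine ⟨le_trans h1 hc1, ?_, ?_⟩
    · intro m' hm' hf
      rcases List.mem_cons.mp hm' with rfl | hms
      · rw [if_pos hf] at h1 ⊢
        exact le_trans h1 (min_le_right _ _)
      · exact h2 m' hms hf
    · rcases h3 with heq | ⟨m', hm', hf', heq⟩
      · by_cases hf : PySem.Str.find low m ≠ -1
        · rcases min_choice c0 (PySem.Str.find low m) with hmin | hmin
          · exact Or.inl (by rw [heq, if_pos hf, hmin])
          · exact Or.inr ⟨m, by simp, hf, by rw [heq, if_pos hf, hmin]⟩
        · exact Or.inl (by rw [heq, if_neg hf])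
      · exact Or.inr ⟨m', List.mem_cons_of_mem _ hm', hf', heq⟩

lemma pvAny_iff (s : List Char) :
    pvStopMarkers.any (fun m => m.toList.isPrefixOf s) = true ↔
    ∃ m ∈ pvStopMarkers, m.toList <+: s := by
  simp [List.any_eq_true, List.isPrefixOf_iff_prefix]

-- the core equality: A's min-of-finds cut = B's first-hit-scan cut
lemma pvCut_eq (title : String) :
    pvStopMarkers.foldl (fun cut marker =>
        let idx := PySem.Str.find (PySem.Str.lower title) marker
        if idx ≠ -1 then min cut idx else cut) (PySem.Str.len title)
      = ((pvFirstStop (PySem.Str.lower title).toList 0 : Nat) : Int) := by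
  set low := PySem.Str.lower title with hlow
  set l := low.toList with hl
  have hlen : l.length = title.length := by
    rw [hl, hlow, PySem.Str.toList_lower]
    simp [PySem.Chars.lower]
  have hlenI : PySem.Str.len title = (l.length : Int) := by
    simp [hlen, PySem.Str.len_eq]
  set F := pvFirstStop l 0 with hF
  obtain ⟨h1, h2, h3⟩ := pvFoldl_min_spec low pvStopMarkers (PySem.Str.len title)
  set cutA := pvStopMarkers.foldl (fun cut marker =>
      let idx := PySem.Str.find low marker
      if idx ≠ -1 then min cut idx else cut) (PySem.Str.len title) with hcutA
  have hfind : ∀ m : String, PySem.Str.find low m = PySem.Chars.find l m.toList := by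
    intro m; simp [hl, PySem.Str.find_eq]
  -- F ≤ cutA
  have hFle : (F : Int) ≤ cutA := by
    rcases h3 with heq | ⟨m, hm, hf, heq⟩
    · rw [heq, hlenI]
      exact_mod_cast pvFirstStop_le l
    · rw [hfind] at hf
      have hpos : 0 ≤ PySem.Chars.find l m.toList :=
        (PySem.Chars.find_nonneg_iff l m.toList).mpr
          ((PySem.Chars.find_ne_neg_one_iff l m.toList).mp hf)
      obtain ⟨hpref, _⟩ := PySem.Chars.find_spec hpos
      have hFle' : F ≤ (PySem.Chars.find l m.toList).toNat := by
        by_contra hlt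
        push_neg at hlt
        have hfalse := pvFirstStop_min l (PySem.Chars.find l m.toList).toNat hlt
        have htrue : pvStopMarkers.any
            (fun mm => mm.toList.isPrefixOf (l.drop (PySem.Chars.find l m.toList).toNat)) = true :=
          (pvAny_iff _).mpr ⟨m, hm, hpref⟩
        simp [hfalse] at htrue
      calc (F : Int) ≤ ((PySem.Chars.find l m.toList).toNat : Int) := by exact_mod_cast hFle'
        _ = PySem.Chars.find l m.toList := Int.toNat_of_nonneg hpos
        _ = cutA := by rw [heq, hfind]
  -- cutA ≤ F
  have hle2 : cutA ≤ (F : Int) := by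
    by_cases hF' : F < l.length
    · have hany := pvFirstStop_hit l hF'
      obtain ⟨m, hm, hpref⟩ := (pvAny_iff _).mp hany
      have hinf : m.toList <:+: l := hpref.isInfix.trans (List.drop_suffix F l).isInfix
      have hfne : PySem.Str.find low m ≠ -1 := by
        rw [hfind]
        exact (PySem.Chars.find_ne_neg_one_iff l m.toList).mpr hinf
      have hpos : 0 ≤ PySem.Chars.find l m.toList :=
        (PySem.Chars.find_nonneg_iff l m.toList).mpr hinf
      obtain ⟨_, hminimal⟩ := PySem.Chars.find_spec hpos
      have hto : (PySem.Chars.find l m.toList).toNat ≤ F := by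
        by_contra hlt
        push_neg at hlt
        exact hminimal F hlt hpref
      calc cutA ≤ PySem.Str.find low m := h2 m hm hfne
        _ = PySem.Chars.find l m.toList := hfind m
        _ = ((PySem.Chars.find l m.toList).toNat : Int) := (Int.toNat_of_nonneg hpos).symm
        _ ≤ (F : Int) := by exact_mod_cast hto
    · push_neg at hF'
      have hFeq : F = l.length := le_antisymm (pvFirstStop_le l) hF'
      calc cutA ≤ PySem.Str.len title := h1
        _ = (l.length : Int) := hlenI
        _ = (F : Int) := by rw [hFeq]
  exact le_antisymm hle2 hFle

-- ===== VERDICT (by name: the statement is the Claim_ definition above) =====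
theorem trim_title_stop_phrases_py_spec : Claim_equal_trim_title_stop_phrases_py := by
  intro title _
  unfold Spec_trim_title_stop_phrases_py
  by_cases h : title = ""
  · subst h
    rfl
  · simp only [trim_title_stop_phrases_py, trim_title_stop_phrases_py_alt, if_neg h]
    rw [pvCut_eq title]
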